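-- pv_equiv track=rewrite | github.com/Red-Gunny/Algorithm | 삼성/17140_이차원 배열과 연산.py | process_r
-- ===== SOURCE A (Python) =====
-- def process_r(A):
--     max_len = 0
--     result = []
--     # 가로로 조사함
--     for line in A:
--         num_dic = {}
--         for num in line:
--             if num == 0:
--                 continue
--             if num not in num_dic:
--                 num_dic[num] = 1
--             else:
--                 num_dic[num] += 1
--         rslt_arr = sorted(num_dic.items(), key=lambda x: (x[1], x[0]))  # 정렬 수행
--
--         # 다시 담기
--         mid_result = []
--         for value in rslt_arr:
--             for v in value:
--                 mid_result.append(v)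
--         max_len = max(max_len, len(mid_result))         # 최대 길이 추출
--         result.append(mid_result)
--
--     for i in range(len(result)):
--         if len(result[i]) < max_len:
--             for _ in range(max_len - len(result[i])):
--                 result[i].append(0)                     # 0으로 넣기
--
--     return result, max_len
-- ===== SOURCE B (Python) =====
-- def _rle(vals):
--     # run-length encode a sorted list: list of (value, run length) pairs
--     pairs = []
--     i = 0
--     n = len(vals)
--     while i < n:
--         j = i + 1
--         while j < n and vals[j] == vals[i]:
--             j += 1
--         pairs.append((vals[i], j - i))
--         i = j
--     return pairs
--
--
-- def process_r(A):
--     rows = []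
--     for line in A:
--         vals = sorted(x for x in line if x != 0)
--         pairs = sorted(_rle(vals), key=lambda p: (p[1], p[0]))
--         rows.append([x for p in pairs for x in p])
--     max_len = max((len(r) for r in rows), default=0)
--     return [r + [0] * (max_len - len(r)) for r in rows], max_len
-- ===== Notes on version B (the rewrite author's own statement) =====
-- stated objective: idiomatic
-- what changed: Per-row dict-based frequency counting is replaced by sort-then-run-length-encode grouping (sort the nonzero values, group equal runs into (value,count) pairs, then sort pairs by (count,value)), and the two-accumulator loop plus in-place padding loop are replaced by map/comprehension-style passes with a max-with-default.
import Mathlib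
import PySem

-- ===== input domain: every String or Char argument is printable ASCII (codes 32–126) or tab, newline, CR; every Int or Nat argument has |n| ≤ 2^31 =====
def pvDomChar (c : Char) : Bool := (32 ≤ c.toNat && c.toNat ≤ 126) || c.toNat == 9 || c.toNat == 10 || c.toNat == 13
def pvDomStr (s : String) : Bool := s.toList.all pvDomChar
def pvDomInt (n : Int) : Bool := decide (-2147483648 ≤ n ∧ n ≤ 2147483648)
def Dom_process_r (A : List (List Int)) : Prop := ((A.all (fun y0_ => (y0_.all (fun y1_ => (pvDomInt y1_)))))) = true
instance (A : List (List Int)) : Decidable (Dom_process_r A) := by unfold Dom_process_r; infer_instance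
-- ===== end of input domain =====

-- B replaces A's per-row dict counting by sort + run-length encoding (more idiomatic
-- sort-and-group); same return value (result, max_len) on every input.

-- ===== PORT A =====
def process_r (A : List (List Int)) : List (List Int) × Int :=
  -- the outer for-loop carries the two accumulators (max_len, result)
  let st := A.foldl (fun (s : Int × List (List Int)) line =>
    let num_dic := line.foldl (fun (d : PySem.Dict Int Int) num =>
      if num == 0 then d
      else if !d.contains num then d.insert num 1
      else d.modify num 0 (fun x => x + 1)) PySem.Dict.empty
    let rslt_arr := PySem.List.sorted2 num_dic.items (fun x => x.2) (fun x => x.1)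
    -- inner 'for v in value' appends the pair's two components one by one
    let mid_result := rslt_arr.foldl (fun acc p => acc ++ [p.1] ++ [p.2]) []
    (max s.1 (mid_result.length : Int), s.2 ++ [mid_result])) (0, [])
  let max_len := st.1
  -- in-place padding loop: each index is written once, ported as a map
  let result := st.2.map (fun r =>
    if (r.length : Int) < max_len then
      (PySem.List.pyRange 0 (max_len - (r.length : Int)) 1).foldl
        (fun acc _ => acc ++ [(0 : Int)]) r
    else r)
  (result, max_len)

-- ===== PORT B =====
-- B's _rle: the inner while loop scans the equal-valued prefix (takeWhile/dropWhile)
def pvRle : List Int → List (Int × Int)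
  | [] => []
  | v :: t =>
    (v, 1 + ((t.takeWhile (fun x => x == v)).length : Int)) ::
      pvRle (t.dropWhile (fun x => x == v))
termination_by l => l.length
decreasing_by
  have := List.length_dropWhile_le (fun x => x == v) t
  simp only [List.length_cons]
  omega

def process_r_alt (A : List (List Int)) : List (List Int) × Int :=
  let rows := A.map (fun line =>
    let vals := PySem.List.sorted (line.filter (fun x => x != 0)) (fun x => x)
    let pairs := PySem.List.sorted2 (pvRle vals) (fun p => p.2) (fun p => p.1)
    pairs.flatMap (fun p => [p.1, p.2]))
  let max_len := PySem.List.maxD (rows.map (fun r => (r.length : Int))) (fun x => x) 0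
  (rows.map (fun r => r ++ PySem.List.pyRepeat [(0 : Int)] (max_len - (r.length : Int))),
   max_len)

-- ===== PRECONDITION & SPEC =====
def Spec_process_r (A : List (List Int)) (out : List (List Int) × Int) : Prop := out = process_r_alt A
instance (A : List (List Int)) (out : List (List Int) × Int) : Decidable (Spec_process_r A out) := by unfold Spec_process_r; infer_instance

-- ===== CLAIM (what is proved, stated in full; the proofs are below) =====
def Claim_equal_process_r : Prop := ∀ (A : List (List Int)), Dom_process_r A → Spec_process_r A (process_r A)

-- ===== LEMMAS AND PROOFS =====

lemma lex_before (a b : Int × Int) : (decide (a.2 < b.2) || (!decide (b.2 < a.2) && decide (a.1 < b.1))) = decide ((toLex (a.2, a.1) : Int ×ₗ Int) < toLex (b.2, b.1)) := by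
  rcases a with ⟨a1, a2⟩; rcases b with ⟨b1, b2⟩
  simp only [Prod.Lex.toLex_lt_toLex]
  rcases lt_trichotomy a2 b2 with h | h | h <;> simp_all [not_lt_of_gt] <;> try omega

lemma sorted2_swap_eq_sorted (l : List (Int × Int)) :
    PySem.List.sorted2 l (fun p => p.2) (fun p => p.1) =
      PySem.List.sorted l (fun p => (toLex (p.2, p.1) : Int ×ₗ Int)) := by
  have hfn : (fun a b : Int × Int => decide (a.2 < b.2) || (!decide (b.2 < a.2) && decide (a.1 < b.1)))
      = (fun a b : Int × Int => decide ((toLex (a.2, a.1) : Int ×ₗ Int) < toLex (b.2, b.1))) := by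
    funext a b; exact lex_before a b
  rw [PySem.List.sorted_eq_foldl_insertBy]
  simp only [PySem.List.sorted2, hfn]
  simp

lemma key_inj : Function.Injective (fun p : Int × Int => (toLex (p.2, p.1) : Int ×ₗ Int)) := by
  intro ⟨a1, a2⟩ ⟨b1, b2⟩ h
  simpa [Prod.ext_iff, and_comm] using congrArg ofLex h

lemma sorted2_eq_of_perm {l₁ l₂ : List (Int × Int)} (h : l₁.Perm l₂) :
    PySem.List.sorted2 l₁ (fun p => p.2) (fun p => p.1) =
      PySem.List.sorted2 l₂ (fun p => p.2) (fun p => p.1) := by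
  rw [sorted2_swap_eq_sorted, sorted2_swap_eq_sorted]
  exact PySem.List.eq_of_perm_of_pairwise_le_of_injective _ key_inj
    ((PySem.List.sorted_perm _ _ _).trans (h.trans (PySem.List.sorted_perm _ _ _).symm))
    (PySem.List.sorted_pairwise _ _) (PySem.List.sorted_pairwise _ _)

lemma dict_eq_counter (line : List Int) :
    line.foldl (fun (d : PySem.Dict Int Int) num =>
      if num == 0 then d
      else if !d.contains num then d.insert num 1
      else d.modify num 0 (fun x => x + 1)) PySem.Dict.empty
    = PySem.Dict.counter (line.filter (fun x => x != 0)) := by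
  rw [PySem.Dict.counter_eq_foldl, ← PySem.List.foldl_if_eq_foldl_filter]
  apply PySem.List.foldl_congr_mem
  intro d num _
  by_cases h : num = 0
  · simp [h]
  · have hb : (num == 0) = false := by simp [h]
    have hb' : (num != 0) = true := by simp [h]
    rw [hb', if_pos rfl, hb]
    simp only [Bool.false_eq_true, if_false]
    by_cases hc : d.contains num
    · simp [hc]
    · have : d.getD num 0 = 0 :=
        PySem.Dict.getD_of_not_contains d 0 (by simpa using hc)
      simp [hc, PySem.Dict.modify, this]

lemma rle_perm : ∀ (l : List Int), l.Pairwise (· ≤ ·) →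
    (pvRle l).Perm ((PySem.Set.ofList l).map (fun k => (k, (l.count k : Int)))) := by
  intro l
  induction l using pvRle.induct with
  | case1 => intro _; simp [pvRle]
  | case2 v t ih =>
    intro hp
    set run := t.takeWhile (fun x => x == v) with hrun
    set rest := t.dropWhile (fun x => x == v) with hrest
    have hvt : ∀ x ∈ t, v ≤ x := fun x hx => (List.pairwise_cons.mp hp).1 x hx
    have hpt : t.Pairwise (· ≤ ·) := (List.pairwise_cons.mp hp).2
    have hsplit : run ++ rest = t := List.takeWhile_append_dropWhile
    have hrunv : ∀ x ∈ run, x = v := by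
      intro x hx
      have := List.mem_takeWhile_imp hx
      simpa using this
    have hprest : rest.Pairwise (· ≤ ·) := hpt.sublist (List.dropWhile_sublist _)
    have hrestne : ∀ x ∈ rest, v < x := by
      cases hR : rest with
      | nil => intro x hx; cases hx
      | cons h r =>
        have hh : (h == v) = false := by
          have hne : List.dropWhile (fun x => x == v) t ≠ [] := by rw [← hrest, hR]; simp
          have := List.head_dropWhile_not (fun x => x == v) (l := t) hne
          simp only [← hrest, hR] at this ⊢
          simpa [hR ▸ hrest.symm] using this
        have hhv : h ≠ v := by simpa using hh
        have hhmem : h ∈ t := (List.dropWhile_sublist _).mem (by rw [← hrest, hR]; simp)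
        have hvh : v < h := lt_of_le_of_ne (hvt h hhmem) (Ne.symm hhv)
        intro x hx
        rcases List.mem_cons.mp hx with rfl | hxr
        · exact hvh
        · have hpr := hR ▸ hprest
          have : h ≤ x := (List.pairwise_cons.mp hpr).1 x hxr
          exact lt_of_lt_of_le hvh this
    have hvnotrest : v ∉ rest := fun h => lt_irrefl v (hrestne v h)
    -- counts
    have hcountvrun : run.count v = run.length := List.count_eq_length.mpr (fun b hb => (hrunv b hb).symm)
    have hcv : ((v :: t).count v : Int) = 1 + (run.length : Int) := by
      rw [List.count_cons_self, ← hsplit, List.count_append, hcountvrun,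
          List.count_eq_zero.mpr hvnotrest]
      push_cast; ring
    have hck : ∀ k ∈ rest, (v :: t).count k = rest.count k := by
      intro k hk
      have hkv : k ≠ v := fun h => lt_irrefl v (h ▸ hrestne k hk)
      rw [List.count_cons_of_ne (Ne.symm hkv), ← hsplit, List.count_append,
          List.count_eq_zero.mpr (fun hm => hkv (hrunv k hm)), Nat.zero_add]
    -- set perm
    have hsetperm : ((PySem.Set.ofList t).discard v).Perm (PySem.Set.ofList rest) := by
      rw [List.perm_ext_iff_of_nodup
        (PySem.Set.nodup_discard _ _ (PySem.Set.nodup_ofList t)) (PySem.Set.nodup_ofList rest)]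
      intro a
      rw [PySem.Set.mem_discard, PySem.Set.mem_ofList, PySem.Set.mem_ofList]
      constructor
      · rintro ⟨ha, hne⟩
        rw [← hsplit] at ha
        rcases List.mem_append.mp ha with h | h
        · exact absurd (hrunv a h) hne
        · exact h
      · intro ha
        exact ⟨(List.dropWhile_sublist _).mem ha, fun h => lt_irrefl v (h ▸ hrestne a ha)⟩
    -- assemble
    rw [pvRle, PySem.Set.ofList_cons, List.map_cons, ← hcv]
    refine List.Perm.cons _ ?_
    refine ((ih hprest).trans ?_)
    have hmapc : ((PySem.Set.ofList rest).map (fun k => (k, (rest.count k : Int))))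
        = ((PySem.Set.ofList rest).map (fun k => (k, ((v :: t).count k : Int)))) := by
      apply List.map_congr_left
      intro k hk
      rw [hck k ((PySem.Set.mem_ofList rest k).mp hk)]
    rw [hmapc]
    exact (hsetperm.map _).symm

def midF (line : List Int) : List Int :=
  (PySem.List.sorted2
    (line.foldl (fun (d : PySem.Dict Int Int) num =>
      if num == 0 then d
      else if !d.contains num then d.insert num 1
      else d.modify num 0 (fun x => x + 1)) PySem.Dict.empty).items
    (fun x => x.2) (fun x => x.1)).foldl (fun acc p => acc ++ [p.1] ++ [p.2]) []

def rowF (line : List Int) : List Int :=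
  (PySem.List.sorted2
    (pvRle (PySem.List.sorted (line.filter (fun x => x != 0)) (fun x => x)))
    (fun p => p.2) (fun p => p.1)).flatMap (fun p => [p.1, p.2])

lemma mid_eq_row : midF = rowF := by
  funext line
  unfold midF rowF
  set f := line.filter (fun x => x != 0) with hf
  have hitems : (line.foldl (fun (d : PySem.Dict Int Int) num =>
      if num == 0 then d
      else if !d.contains num then d.insert num 1
      else d.modify num 0 (fun x => x + 1)) PySem.Dict.empty).items
      = (PySem.Set.ofList f).map (fun k => (k, (f.count k : Int))) := by
    rw [dict_eq_counter, PySem.Dict.items_counter]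
  have hsortpair : (PySem.List.sorted f (fun x => x)).Pairwise (· ≤ ·) := by
    simpa using PySem.List.sorted_pairwise f (fun x => x)
  have hperm1 := rle_perm _ hsortpair
  have hpermf : (PySem.List.sorted f (fun x => x)).Perm f := PySem.List.sorted_perm f _ _
  have hsetperm : (PySem.Set.ofList (PySem.List.sorted f (fun x => x))).Perm (PySem.Set.ofList f) := by
    rw [List.perm_ext_iff_of_nodup (PySem.Set.nodup_ofList _) (PySem.Set.nodup_ofList _)]
    intro a
    rw [PySem.Set.mem_ofList, PySem.Set.mem_ofList]
    exact hpermf.mem_iff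
  have hcounts : ((PySem.Set.ofList (PySem.List.sorted f (fun x => x))).map
        (fun k => (k, ((PySem.List.sorted f (fun x => x)).count k : Int))))
      = ((PySem.Set.ofList (PySem.List.sorted f (fun x => x))).map
        (fun k => (k, (f.count k : Int)))) := by
    apply List.map_congr_left
    intro k _
    rw [hpermf.count_eq]
  have hperm : (pvRle (PySem.List.sorted f (fun x => x))).Perm
      ((PySem.Set.ofList f).map (fun k => (k, (f.count k : Int)))) :=
    hperm1.trans (by rw [hcounts]; exact hsetperm.map _)
  rw [hitems, sorted2_eq_of_perm hperm.symm]
  rw [PySem.List.foldl_congr_mem _ _ (fun acc p => acc ++ [p.1, p.2]) []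
    (fun acc x _ => by simp)]
  rw [PySem.List.foldl_append_eq_flatMap]
  simp

lemma foldl_append_zeros (l : List Int) (r : List Int) :
    l.foldl (fun acc _ => acc ++ [(0 : Int)]) r = r ++ List.replicate l.length 0 := by
  induction l generalizing r with
  | nil => simp
  | cons x t ih =>
    simp only [List.foldl_cons, ih, List.length_cons, List.replicate_succ]
    simp [List.append_assoc]

theorem process_r_eq_alt (A : List (List Int)) : process_r A = process_r_alt A := by
  have hA : process_r A =
      ((A.foldl (fun acc line => acc ++ [midF line]) []).map (fun r =>
        if (r.length : Int) < A.foldl (fun m line => max m ((midF line).length : Int)) 0 then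
          (PySem.List.pyRange 0 ((A.foldl (fun m line => max m ((midF line).length : Int)) 0) - (r.length : Int)) 1).foldl
            (fun acc _ => acc ++ [(0 : Int)]) r
        else r),
       A.foldl (fun m line => max m ((midF line).length : Int)) 0) := by
    unfold process_r
    rw [show (A.foldl (fun (s : Int × List (List Int)) line =>
        let num_dic := line.foldl (fun (d : PySem.Dict Int Int) num =>
          if num == 0 then d
          else if !d.contains num then d.insert num 1
          else d.modify num 0 (fun x => x + 1)) PySem.Dict.empty
        let rslt_arr := PySem.List.sorted2 num_dic.items (fun x => x.2) (fun x => x.1)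
        let mid_result := rslt_arr.foldl (fun acc p => acc ++ [p.1] ++ [p.2]) []
        (max s.1 (mid_result.length : Int), s.2 ++ [mid_result])) (0, []))
      = (A.foldl (fun m line => max m ((midF line).length : Int)) 0,
         A.foldl (fun acc line => acc ++ [midF line]) []) from
      PySem.List.foldl_prod_mk (fun m line => max m ((midF line).length : Int))
        (fun acc line => acc ++ [midF line]) A 0 []]
  rw [hA, PySem.List.foldl_append_singleton_eq_map, mid_eq_row]
  have hmax : A.foldl (fun m line => max m ((rowF line).length : Int)) 0
      = PySem.List.maxD ((A.map rowF).map (fun r => (r.length : Int))) (fun x => x) 0 := by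
    rw [List.map_map]
    cases A with
    | nil => rfl
    | cons a as =>
      simp only [List.map_cons, List.foldl_cons]
      rw [PySem.List.maxD, PySem.List.max?_id_cons, Option.getD_some, List.foldl_map]
      have h0 : max 0 (((rowF a).length : Nat) : Int) = ((rowF a).length : Int) :=
        max_eq_right (Int.natCast_nonneg _)
      rw [h0]
      simp [Function.comp]
  have hB : process_r_alt A =
      ((A.map rowF).map (fun r => r ++ PySem.List.pyRepeat [(0 : Int)]
        (PySem.List.maxD ((A.map rowF).map (fun r => (r.length : Int))) (fun x => x) 0 - (r.length : Int))),
       PySem.List.maxD ((A.map rowF).map (fun r => (r.length : Int))) (fun x => x) 0) := rfl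
  rw [hB]
  simp only [List.nil_append, hmax]
  refine Prod.ext ?_ rfl
  apply List.map_congr_left
  intro r hr
  rcases List.mem_map.mp hr with ⟨line, hline, rfl⟩
  set mx := PySem.List.maxD ((A.map rowF).map (fun r => (r.length : Int))) (fun x => x) 0 with hmx
  have hle : ((rowF line).length : Int) ≤ mx := by
    rw [← hmax]
    exact (PySem.List.le_foldl_max_int A (fun line => ((rowF line).length : Int)) 0).2 line hline
  rw [PySem.List.pyRepeat_singleton]
  by_cases hlt : ((rowF line).length : Int) < mx
  · rw [if_pos hlt, foldl_append_zeros, PySem.List.length_pyRange_one]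
    norm_num
  · rw [if_neg hlt]
    have : (mx - ((rowF line).length : Int)).toNat = 0 := by omega
    rw [this]
    simp

-- ===== VERDICT (by name: the statement is the Claim_ definition above) =====
theorem process_r_spec : Claim_equal_process_r := by
  intro A _
  unfold Spec_process_r
  exact process_r_eq_alt A
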